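-- pv_equiv track=rewrite | github.com/ipipan/spacy-pl-trf | process_nkjp.py | resolve_entity
-- ===== SOURCE A (Python) =====
-- def resolve_entity(entity, entities):
--     # translate targets defined in terms of entities, into morphological units
--     # works recurrently
--     targets = entity["targets"]
--     resolved = []
--     for target in targets:
--         if target.startswith("named_"):
--             target_entity = entities[target]
--             resolved.extend(resolve_entity(target_entity, entities))
--         else:
--             resolved.append(target)
--     return resolved
-- ===== SOURCE B (Python) =====
-- def resolve_entity(entity, entities):
--     # iterative pre-order expansion with an explicit stack instead of recursion
--     stack = list(reversed(entity["targets"]))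
--     resolved = []
--     while stack:
--         target = stack.pop()
--         if target.startswith("named_"):
--             stack.extend(reversed(entities[target]["targets"]))
--         else:
--             resolved.append(target)
--     return resolved
-- ===== Notes on version B (the rewrite author's own statement) =====
-- stated objective: alternative
-- what changed: Replaces A's recursion with an iterative pre-order traversal over an explicit stack: a named_ target is expanded by splicing its sub-targets onto the stack instead of a recursive call.
import Mathlib
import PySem

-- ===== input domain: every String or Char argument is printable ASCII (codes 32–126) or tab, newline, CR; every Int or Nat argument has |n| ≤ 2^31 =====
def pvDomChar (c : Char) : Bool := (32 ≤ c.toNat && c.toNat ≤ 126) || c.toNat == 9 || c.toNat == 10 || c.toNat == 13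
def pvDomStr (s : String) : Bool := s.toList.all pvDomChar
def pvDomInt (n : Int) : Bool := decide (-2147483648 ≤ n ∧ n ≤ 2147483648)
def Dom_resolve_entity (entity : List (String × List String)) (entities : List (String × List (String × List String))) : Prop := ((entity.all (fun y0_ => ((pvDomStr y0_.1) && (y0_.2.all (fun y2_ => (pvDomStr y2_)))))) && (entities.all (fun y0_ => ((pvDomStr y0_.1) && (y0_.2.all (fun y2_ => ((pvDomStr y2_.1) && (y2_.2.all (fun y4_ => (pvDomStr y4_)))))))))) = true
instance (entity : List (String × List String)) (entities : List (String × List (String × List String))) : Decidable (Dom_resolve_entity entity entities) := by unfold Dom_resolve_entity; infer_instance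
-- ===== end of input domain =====

-- B replaces A's recursion by an iterative pre-order traversal over an explicit stack
-- (objective: alternative decomposition; same values on every input on which A returns).

-- ===== PORT A =====
def pvNamed (s : String) : Bool := PySem.Str.startswith s "named_"

-- e["targets"]; the KeyError case (get? = none) lies outside Pre_, the default [] is never used there
def pvTgts (e : List (String × List String)) : List String :=
  ((PySem.Dict.mk e).get? "targets").getD []

-- entities[t]["targets"]; both KeyError cases lie outside Pre_ for the targets A actually reaches
def pvChild (E : List (String × List (String × List String))) (t : String) : List String :=
  pvTgts (((PySem.Dict.mk E).get? t).getD [])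

-- A's recursion; the fuel only totalizes it: under Pre_ the named_ references reachable from the
-- entity are acyclic, so the depth never exceeds the number of distinct keys + 1 and fuel 0 is never hit
def pvGoA (E : List (String × List (String × List String))) : Nat → List String → List String
  | 0, _ => []
  | f + 1, ts =>
    ts.foldl (fun acc t =>
      if pvNamed t then acc ++ pvGoA E f (pvChild E t) else acc ++ [t]) []

def resolve_entity (entity : List (String × List String)) (entities : List (String × List (String × List String))) : List String :=
  pvGoA entities (entities.length + 1) (pvTgts entity)

-- ===== PORT B =====
-- the Python while-loop over a stack (top at the Python list's END); modelled with the top at the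
-- HEAD, so 'stack = list(reversed(ts))' is 'ts', 'pop()' is the head and 'extend(reversed(ts))' is 'ts ++ ·'
def pvLoop (E : List (String × List (String × List String))) : Nat → List String → List String → List String
  | 0, _, acc => acc                                   -- fuel exhaustion: never reached under Pre_
  | _ + 1, [], acc => acc                              -- while stack: exit
  | f + 1, t :: st, acc =>
    if pvNamed t then pvLoop E f (pvChild E t ++ st) acc
    else pvLoop E f st (acc ++ [t])

-- total size of all target lists of entities (used only to size the totalizing fuel)
def pvT (E : List (String × List (String × List String))) : Nat :=
  (E.map (fun kv => (kv.2.map (fun p => p.2.length)).sum)).sum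

-- fuel for the while loop: under Pre_ the loop runs at most this often (proved below)
def pvFuel (entity : List (String × List String)) (E : List (String × List (String × List String))) : Nat :=
  (pvTgts entity).length * (pvT E + 1) ^ (E.length + 1) + 1

def resolve_entity_alt (entity : List (String × List String)) (entities : List (String × List (String × List String))) : List String :=
  pvLoop entities (pvFuel entity entities) (pvTgts entity) []

-- ===== PRECONDITION & SPEC =====
-- helpers for Pre_: the named_-dependency graph of the input
def pvNexts (E : List (String × List (String × List String))) (t : String) : List String :=
  if pvNamed t then (pvChild E t).filter pvNamed else []

-- nodes reachable from a start set by at most m dependency steps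
def pvGrow (E : List (String × List (String × List String))) : Nat → List String → List String
  | 0, s => s
  | m + 1, s => pvGrow E m ((s ++ s.flatMap (pvNexts E)).dedup)

def pvRoots (entity : List (String × List String)) : List String :=
  (pvTgts entity).filter pvNamed

def pvN (E : List (String × List (String × List String))) : Nat :=
  ((E.map Prod.fst).dedup).length

def pvReachSet (entity : List (String × List String)) (E : List (String × List (String × List String))) : List String :=
  pvGrow E (pvN E) (pvRoots entity)

-- Pre_ excludes exactly the inputs on which A raises: a missing "targets" key of the entity
-- (KeyError), a reachable named_ target with no entry or an entry without "targets" (KeyError),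
-- and a reachable cycle of named_ references (RecursionError).
def Pre_resolve_entity (entity : List (String × List String)) (entities : List (String × List (String × List String))) : Prop :=
  ((PySem.Dict.mk entity).get? "targets").isSome = true ∧
  ∀ t ∈ pvReachSet entity entities,
    (((PySem.Dict.mk entities).get? t).isSome = true ∧
     ((PySem.Dict.mk (((PySem.Dict.mk entities).get? t).getD [])).get? "targets").isSome = true) ∧
    t ∉ pvGrow entities (pvN entities) (pvNexts entities t)

instance (entity : List (String × List String)) (entities : List (String × List (String × List String))) : Decidable (Pre_resolve_entity entity entities) := by unfold Pre_resolve_entity; infer_instance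

def pvWitness_resolve_entity : (List (String × List String)) × (List (String × List (String × List String))) :=
  ([("targets", ["named_a", "w"])], [("named_a", [("targets", ["x", "y"])])])

def Spec_resolve_entity (entity : List (String × List String)) (entities : List (String × List (String × List String))) (out : List String) : Prop := out = resolve_entity_alt entity entities
instance (entity : List (String × List String)) (entities : List (String × List (String × List String))) (out : List String) : Decidable (Spec_resolve_entity entity entities out) := by unfold Spec_resolve_entity; infer_instance

-- ===== CLAIM (what is proved, stated in full; the proofs are below) =====
def Claim_equal_resolve_entity : Prop := ∀ (entity : List (String × List String)) (entities : List (String × List (String × List String))), Dom_resolve_entity entity entities → Pre_resolve_entity entity entities → Spec_resolve_entity entity entities (resolve_entity entity entities)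

-- ===== LEMMAS AND PROOFS =====

-- one dependency step of the input graph
def pvStep (E : List (String × List (String × List String))) (t u : String) : Prop :=
  pvNamed t = true ∧ pvNamed u = true ∧ u ∈ pvChild E t

-- a walk t --l--> y along pvStep (l = the vertices after t)
def pvWalk (E : List (String × List (String × List String))) : String → List String → String → Prop
  | x, [], y => x = y
  | x, z :: l, y => pvStep E x z ∧ pvWalk E z l y

-- the chain of ancestors of the current recursion frame, most recent first
def pvSChain (entity : List (String × List String)) (E : List (String × List (String × List String))) : List String → Prop
  | [] => True
  | [t] => t ∈ pvRoots entity
  | t :: s :: r => pvStep E s t ∧ pvSChain entity E (s :: r)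

def pvLink (entity : List (String × List String)) (E : List (String × List (String × List String))) (S : List String) (t : String) : Prop :=
  match S with
  | [] => t ∈ pvRoots entity
  | s :: _ => pvStep E s t

def pvInv (entity : List (String × List String)) (E : List (String × List (String × List String))) (S ts : List String) : Prop :=
  pvSChain entity E S ∧ S.Nodup ∧ (∀ s ∈ S, s ∈ E.map Prod.fst) ∧
  ∀ t ∈ ts, pvNamed t = true → pvLink entity E S t

-- the canonical expansion value both ports compute
def pvW (E : List (String × List (String × List String))) (ts : List String) : List String :=
  pvGoA E (pvN E + 1) ts

theorem pvGoA_nil (E : List (String × List (String × List String))) (f : Nat) :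
    pvGoA E f [] = [] := by cases f <;> rfl

theorem pvLoop_nil (E : List (String × List (String × List String))) (f : Nat) (acc : List String) :
    pvLoop E f [] acc = acc := by cases f <;> rfl

theorem pvGoA_succ (E : List (String × List (String × List String))) (f : Nat) (ts : List String) :
    pvGoA E (f + 1) ts = ts.flatMap (fun t => if pvNamed t then pvGoA E f (pvChild E t) else [t]) := by
  show ts.foldl _ [] = _
  have hfun : (fun (acc : List String) t =>
      if pvNamed t then acc ++ pvGoA E f (pvChild E t) else acc ++ [t]) =
      (fun acc t => acc ++ (if pvNamed t then pvGoA E f (pvChild E t) else [t])) := by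
    funext acc t; by_cases h : pvNamed t <;> simp [h]
  rw [hfun, PySem.List.foldl_append_eq_flatMap]
  simp

-- lookup success implies membership, and the converse
theorem pv_get_mem {α : Type} : ∀ (l : List (String × α)) (k : String) (v : α),
    (PySem.Dict.mk l).get? k = some v → (k, v) ∈ l := by
  intro l
  induction l with
  | nil => intro k v h; simp [PySem.Dict.get?] at h
  | cons kv tl ih =>
    intro k v h
    rw [show kv = (kv.1, kv.2) from rfl, PySem.Dict.get?_mk_cons] at h
    by_cases he : kv.1 == k
    · simp only [he, if_true, Option.some.injEq] at h
      exact List.mem_cons.mpr (Or.inl (by cases h; simpa using (beq_iff_eq.mp he).symm ▸ rfl))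
    · simp only [he, Bool.false_eq_true, if_false] at h
      exact List.mem_cons_of_mem _ (ih k v h)

theorem pv_get_none {α : Type} (l : List (String × α)) (k : String)
    (h : k ∉ l.map Prod.fst) : (PySem.Dict.mk l).get? k = none := by
  cases hg : (PySem.Dict.mk l).get? k with
  | none => rfl
  | some v => exact absurd (List.mem_map_of_mem (f := Prod.fst) (pv_get_mem l k v hg)) h

theorem pv_child_nil (E : List (String × List (String × List String))) (t : String)
    (h : t ∉ E.map Prod.fst) : pvChild E t = [] := by
  rw [pvChild, pv_get_none E t h]
  rfl

theorem pv_mem_of_child_ne (E : List (String × List (String × List String))) (t : String)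
    (h : pvChild E t ≠ []) : t ∈ E.map Prod.fst := by
  by_contra hc
  exact h (pv_child_nil E t hc)

theorem pv_child_le (E : List (String × List (String × List String))) (t : String) :
    (pvChild E t).length ≤ pvT E := by
  cases hg : (PySem.Dict.mk E).get? t with
  | none =>
    rw [pvChild, hg]
    simp [pvTgts, PySem.Dict.get?]
  | some e =>
    rw [pvChild, hg]
    cases hg2 : (PySem.Dict.mk e).get? "targets" with
    | none => simp [pvTgts, hg2]
    | some v =>
      have h1 : v.length ≤ (e.map (fun p => p.2.length)).sum := by
        apply List.single_le_sum (by intro x _; omega)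
        exact List.mem_map.mpr ⟨("targets", v), pv_get_mem e _ v hg2, rfl⟩
      have h2 : (e.map (fun p => p.2.length)).sum ≤ pvT E := by
        apply List.single_le_sum (by intro x _; omega)
        exact List.mem_map.mpr ⟨(t, e), pv_get_mem E t e hg, rfl⟩
      simp only [pvTgts, hg2, Option.getD_some]
      omega

-- a nodup list of keys is no longer than the number of distinct keys
theorem pv_len (E : List (String × List (String × List String))) (S : List String)
    (hnd : S.Nodup) (hs : ∀ s ∈ S, s ∈ E.map Prod.fst) : S.length ≤ pvN E := by
  have h1 : S.toFinset.card = S.length := List.toFinset_card_of_nodup hnd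
  have h2 : S.toFinset ⊆ (E.map Prod.fst).toFinset := by
    intro x hx
    exact List.mem_toFinset.mpr (hs x (List.mem_toFinset.mp hx))
  have h3 : (E.map Prod.fst).toFinset.card = ((E.map Prod.fst).dedup).length :=
    List.card_toFinset _
  have := Finset.card_le_card h2
  rw [pvN]
  omega

-- pvGrow lemmas
theorem pv_grow_mono (E : List (String × List (String × List String))) :
    ∀ (m : Nat) (s s' : List String), s ⊆ s' → pvGrow E m s ⊆ pvGrow E m s' := by
  intro m
  induction m with
  | zero => intro s s' h; simpa [pvGrow] using h
  | succ m ih =>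
    intro s s' h
    rw [pvGrow, pvGrow]
    apply ih
    intro x hx
    simp only [List.mem_dedup, List.mem_append, List.mem_flatMap] at hx ⊢
    rcases hx with hx | ⟨a, ha, hxa⟩
    · exact Or.inl (h hx)
    · exact Or.inr ⟨a, h ha, hxa⟩

theorem pv_grow_start (E : List (String × List (String × List String))) :
    ∀ (m : Nat) (s : List String), s ⊆ pvGrow E m s := by
  intro m
  induction m with
  | zero => intro s; simp [pvGrow]
  | succ m ih =>
    intro s
    rw [pvGrow]
    intro x hx
    exact ih _ (by simp [hx])

theorem pv_grow_succ (E : List (String × List (String × List String))) :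
    ∀ (m : Nat) (s : List String), pvGrow E m s ⊆ pvGrow E (m + 1) s := by
  intro m
  induction m with
  | zero =>
    intro s x hx
    rw [pvGrow] at hx
    exact pv_grow_start E 1 s hx
  | succ m ih =>
    intro s
    rw [pvGrow, show pvGrow E (m + 1 + 1) s = pvGrow E (m + 1) ((s ++ s.flatMap (pvNexts E)).dedup) from rfl]
    exact ih _

theorem pv_grow_steps (E : List (String × List (String × List String))) (m m' : Nat)
    (h : m ≤ m') (s : List String) : pvGrow E m s ⊆ pvGrow E m' s := by
  induction m', h using Nat.le_induction with
  | base => exact fun _ h => h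
  | succ n hn ih => exact fun x hx => pv_grow_succ E n s (ih hx)

-- walk lemmas
theorem pv_walk_snoc (E : List (String × List (String × List String))) :
    ∀ (l : List String) (x y z : String), pvWalk E x l y → pvStep E y z → pvWalk E x (l ++ [z]) z := by
  intro l
  induction l with
  | nil => intro x y z hw hs; rw [pvWalk] at hw; subst hw; exact ⟨hs, rfl⟩
  | cons a l ih =>
    intro x y z hw hs
    obtain ⟨h1, h2⟩ := hw
    exact ⟨h1, ih a y z h2 hs⟩

theorem pv_walk_cut (E : List (String × List (String × List String))) :
    ∀ (l1 : List String) (x v : String) (l2 : List String) (y : String),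
      pvWalk E x (l1 ++ v :: l2) y → pvWalk E v l2 y := by
  intro l1
  induction l1 with
  | nil => intro x v l2 y h; exact h.2
  | cons a l1 ih => intro x v l2 y h; exact ih a v l2 y h.2

theorem pv_walk_grow (E : List (String × List (String × List String))) :
    ∀ (l : List String) (x y : String), pvWalk E x l y → y ∈ pvGrow E l.length [x] := by
  intro l
  induction l with
  | nil => intro x y h; rw [pvWalk] at h; subst h; simp [pvGrow]
  | cons z l ih =>
    intro x y h
    obtain ⟨hs, hw⟩ := h
    have hz : z ∈ pvNexts E x := by
      rw [pvNexts, if_pos hs.1]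
      exact List.mem_filter.mpr ⟨hs.2.2, hs.2.1⟩
    have hsub : [z] ⊆ ([x] ++ [x].flatMap (pvNexts E)).dedup := by
      intro w hw'
      simp only [List.mem_singleton] at hw'
      subst hw'
      simp only [List.mem_dedup, List.mem_append, List.mem_flatMap]
      exact Or.inr ⟨x, by simp, hz⟩
    rw [List.length_cons, pvGrow]
    exact pv_grow_mono E l.length _ _ hsub (ih z y hw)

theorem pv_walk_keys (E : List (String × List (String × List String))) :
    ∀ (l : List String) (x y : String), pvWalk E x l y → y ∈ E.map Prod.fst →
      ∀ v ∈ x :: l, v ∈ E.map Prod.fst := by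
  intro l
  induction l with
  | nil =>
    intro x y h hy v hv
    rw [pvWalk] at h; subst h
    simp only [List.mem_singleton] at hv; subst hv; exact hy
  | cons z l ih =>
    intro x y h hy v hv
    obtain ⟨hs, hw⟩ := h
    rcases List.mem_cons.mp hv with rfl | hv
    · exact pv_mem_of_child_ne E v (List.ne_nil_of_mem hs.2.2)
    · exact ih z y hw hy v hv

-- every walk contains a repetition-free walk with the same endpoints
theorem pv_pathify (E : List (String × List (String × List String))) :
    ∀ (m : Nat) (l : List String) (x y : String), l.length ≤ m → pvWalk E x l y →
      ∃ l', pvWalk E x l' y ∧ l'.length ≤ l.length ∧ (x :: l').Nodup := by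
  intro m
  induction m with
  | zero =>
    intro l x y hl hw
    have : l = [] := List.eq_nil_of_length_eq_zero (by omega)
    subst this
    exact ⟨[], hw, le_rfl, by simp⟩
  | succ m ih =>
    intro l x y hl hw
    cases l with
    | nil => exact ⟨[], hw, le_rfl, by simp⟩
    | cons z l2 =>
      obtain ⟨hs, hw2⟩ := hw
      have hl2 : l2.length ≤ m := by simp only [List.length_cons] at hl; omega
      obtain ⟨l2', hw2', hlen2, hnd2⟩ := ih l2 z y hl2 hw2
      by_cases hx : x ∈ z :: l2'
      · rcases List.mem_cons.mp hx with rfl | hx2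
        · obtain ⟨l'', hw'', hlen'', hnd''⟩ := ih l2' x y (by omega) hw2'
          refine ⟨l'', hw'', ?_, hnd''⟩
          simp only [List.length_cons]
          omega
        · obtain ⟨a, b, rfl⟩ := List.append_of_mem hx2
          have hwb : pvWalk E x b y := pv_walk_cut E a z x b y hw2'
          have hab : (a ++ x :: b).length ≤ l2.length := hlen2
          have hblen : b.length ≤ m := by
            simp only [List.length_append, List.length_cons] at hab
            omega
          obtain ⟨l'', hw'', hlen'', hnd''⟩ := ih b x y hblen hwb
          refine ⟨l'', hw'', ?_, hnd''⟩
          simp only [List.length_append, List.length_cons] at hab ⊢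
          omega
      · exact ⟨z :: l2', ⟨hs, hw2'⟩, by simpa using hlen2, List.nodup_cons.mpr ⟨hx, hnd2⟩⟩

-- a walk from a root to a key lands in the reachable set Pre_ talks about
theorem pv_walk_reach (entity : List (String × List String)) (E : List (String × List (String × List String)))
    {r : String} {l : List String} {t : String}
    (hr : r ∈ pvRoots entity) (hw : pvWalk E r l t) (hk : t ∈ E.map Prod.fst) :
    t ∈ pvReachSet entity E := by
  obtain ⟨l', hw', hlen, hnd⟩ := pv_pathify E l.length l r t le_rfl hw
  have hsub : ∀ v ∈ r :: l', v ∈ E.map Prod.fst := pv_walk_keys E l' r t hw' hk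
  have hb : (r :: l').length ≤ pvN E := pv_len E (r :: l') hnd hsub
  have h1 : t ∈ pvGrow E l'.length [r] := pv_walk_grow E l' r t hw'
  have h2 : t ∈ pvGrow E (pvN E) [r] := pv_grow_steps E l'.length (pvN E) (by simp at hb; omega) [r] h1
  exact pv_grow_mono E (pvN E) [r] (pvRoots entity) (by intro v hv; simp at hv; subst hv; exact hr) h2

-- a reachable nonempty cycle contradicts Pre_'s acyclicity check
theorem pv_cycle_false (entity : List (String × List String)) (E : List (String × List (String × List String)))
    (hpre2 : ∀ t ∈ pvReachSet entity E, t ∉ pvGrow E (pvN E) (pvNexts E t))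
    {t : String} {l : List String}
    (hreach : t ∈ pvReachSet entity E) (hk : t ∈ E.map Prod.fst)
    (hne : l ≠ []) (hw : pvWalk E t l t) : False := by
  cases l with
  | nil => exact hne rfl
  | cons z l2 =>
    obtain ⟨hs, hw2⟩ := hw
    obtain ⟨l2', hw2', hlen2, hnd2⟩ := pv_pathify E l2.length l2 z t le_rfl hw2
    have hsub : ∀ v ∈ z :: l2', v ∈ E.map Prod.fst := pv_walk_keys E l2' z t hw2' hk
    have hb : (z :: l2').length ≤ pvN E := pv_len E (z :: l2') hnd2 hsub
    have h1 : t ∈ pvGrow E l2'.length [z] := pv_walk_grow E l2' z t hw2'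
    have h2 : t ∈ pvGrow E (pvN E) [z] := pv_grow_steps E l2'.length (pvN E) (by simp at hb; omega) [z] h1
    have hz : z ∈ pvNexts E t := by
      rw [pvNexts, if_pos hs.1]
      exact List.mem_filter.mpr ⟨hs.2.2, hs.2.1⟩
    have h3 : t ∈ pvGrow E (pvN E) (pvNexts E t) :=
      pv_grow_mono E (pvN E) [z] (pvNexts E t) (by intro v hv; simp at hv; subst hv; exact hz) h2
    exact hpre2 t hreach h3

-- an ancestor chain gives a walk from a root to its head
theorem pv_schain_walk (entity : List (String × List String)) (E : List (String × List (String × List String))) :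
    ∀ (S : List String) (s : String), pvSChain entity E (s :: S) →
      ∃ r l, r ∈ pvRoots entity ∧ pvWalk E r l s := by
  intro S
  induction S with
  | nil => intro s h; exact ⟨s, [], h, rfl⟩
  | cons s2 S' ih =>
    intro s h
    obtain ⟨hs, hch⟩ := h
    obtain ⟨r, l, hr, hw⟩ := ih s2 hch
    exact ⟨r, l ++ [s], hr, pv_walk_snoc E l r s2 s hw hs⟩

-- and a walk from any of its members to its head
theorem pv_schain_from (entity : List (String × List String)) (E : List (String × List (String × List String))) :
    ∀ (S : List String) (s t : String), pvSChain entity E (s :: S) → t ∈ s :: S →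
      ∃ l, pvWalk E t l s := by
  intro S
  induction S with
  | nil =>
    intro s t _ ht
    simp only [List.mem_singleton] at ht; subst ht
    exact ⟨[], rfl⟩
  | cons s2 S' ih =>
    intro s t h ht
    obtain ⟨hs, hch⟩ := h
    rcases List.mem_cons.mp ht with rfl | ht2
    · exact ⟨[], rfl⟩
    · obtain ⟨l, hw⟩ := ih s2 t hch ht2
      exact ⟨l ++ [s], pv_walk_snoc E l t s2 s hw hs⟩

-- pushing a named in-keys target onto the ancestor chain keeps the invariant
theorem pv_push (entity : List (String × List String)) (E : List (String × List (String × List String)))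
    (hpre2 : ∀ t ∈ pvReachSet entity E, t ∉ pvGrow E (pvN E) (pvNexts E t))
    {S ts : List String} {t : String}
    (hInv : pvInv entity E S ts) (ht : t ∈ ts) (hn : pvNamed t = true) (hk : t ∈ E.map Prod.fst) :
    pvInv entity E (t :: S) (pvChild E t) ∧ (t :: S).length ≤ pvN E := by
  obtain ⟨hch, hnd, hsk, hlink⟩ := hInv
  have hlk := hlink t ht hn
  have hreach : t ∈ pvReachSet entity E := by
    cases S with
    | nil => exact pv_walk_reach entity E hlk (l := []) rfl hk
    | cons s S' =>
      obtain ⟨r, l, hr, hw⟩ := pv_schain_walk entity E S' s hch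
      exact pv_walk_reach entity E hr (pv_walk_snoc E l r s t hw hlk) hk
  have hts : t ∉ S := by
    intro hmem
    cases S with
    | nil => cases hmem
    | cons s S' =>
      obtain ⟨l, hw⟩ := pv_schain_from entity E S' s t hch hmem
      exact pv_cycle_false entity E hpre2 hreach hk (by simp)
        (pv_walk_snoc E l t s t hw hlk)
  have hch' : pvSChain entity E (t :: S) := by
    cases S with
    | nil => exact hlk
    | cons s S' => exact ⟨hlk, hch⟩
  have hnd' : (t :: S).Nodup := List.nodup_cons.mpr ⟨hts, hnd⟩
  have hsk' : ∀ s ∈ t :: S, s ∈ E.map Prod.fst := by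
    intro s hs
    rcases List.mem_cons.mp hs with rfl | hs
    · exact hk
    · exact hsk s hs
  refine ⟨⟨hch', hnd', hsk', ?_⟩, pv_len E (t :: S) hnd' hsk'⟩
  intro u hu hnu
  exact ⟨hn, hnu, hu⟩

theorem pvInv_tail (entity : List (String × List String)) (E : List (String × List (String × List String)))
    {S : List String} {t : String} {ts : List String}
    (h : pvInv entity E S (t :: ts)) : pvInv entity E S ts :=
  ⟨h.1, h.2.1, h.2.2.1, fun u hu hn => h.2.2.2 u (List.mem_cons_of_mem _ hu) hn⟩

-- A's recursion is fuel-independent once the fuel exceeds the remaining chain budget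
theorem pv_stab (entity : List (String × List String)) (E : List (String × List (String × List String)))
    (hpre2 : ∀ t ∈ pvReachSet entity E, t ∉ pvGrow E (pvN E) (pvNexts E t)) :
    ∀ (d : Nat) (S ts : List String), pvN E + 1 - S.length ≤ d → pvInv entity E S ts →
      ∀ f g, pvN E - S.length < f → pvN E - S.length < g → pvGoA E f ts = pvGoA E g ts := by
  intro d
  induction d with
  | zero =>
    intro S ts hd hInv f g hf hg
    have := pv_len E S hInv.2.1 hInv.2.2.1
    omega
  | succ d ihd =>
    intro S ts hd hInv f g hf hg
    obtain ⟨f', rfl⟩ : ∃ f', f = f' + 1 := ⟨f - 1, by omega⟩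
    obtain ⟨g', rfl⟩ : ∃ g', g = g' + 1 := ⟨g - 1, by omega⟩
    rw [pvGoA_succ, pvGoA_succ]
    apply List.flatMap_congr
    intro t ht
    by_cases hn : pvNamed t = true
    · by_cases hk : t ∈ E.map Prod.fst
      · obtain ⟨hInvC, hlen⟩ := pv_push entity E hpre2 hInv ht hn hk
        simp only [hn, if_true]
        have hlen' : S.length + 1 ≤ pvN E := by simpa using hlen
        exact ihd (t :: S) (pvChild E t) (by simp; omega) hInvC f' g'
          (by simp; omega) (by simp; omega)
      · simp [hn, pv_child_nil E t hk, pvGoA_nil]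
    · simp [hn]

-- one unfolding of the canonical expansion
theorem pvW_unfold (entity : List (String × List String)) (E : List (String × List (String × List String)))
    (hpre2 : ∀ t ∈ pvReachSet entity E, t ∉ pvGrow E (pvN E) (pvNexts E t))
    {S ts : List String} (hInv : pvInv entity E S ts) :
    pvW E ts = ts.flatMap (fun t => if pvNamed t then pvW E (pvChild E t) else [t]) := by
  rw [pvW, pv_stab entity E hpre2 (pvN E + 1) S ts (by omega) hInv (pvN E + 1) (pvN E + 2)
    (by omega) (by omega), pvGoA_succ]
  rfl

-- the while loop consumes each frame like A's recursion does
theorem pv_bridge (entity : List (String × List String)) (E : List (String × List (String × List String)))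
    (hpre2 : ∀ t ∈ pvReachSet entity E, t ∉ pvGrow E (pvN E) (pvNexts E t)) :
    ∀ (d : Nat) (S ts : List String), pvN E + 1 - S.length ≤ d → pvInv entity E S ts →
      ∃ c, c ≤ ts.length * (pvT E + 1) ^ d ∧
        ∀ st acc f, pvLoop E (f + c) (ts ++ st) acc = pvLoop E f st (acc ++ pvW E ts) := by
  intro d
  induction d with
  | zero =>
    intro S ts hd hInv
    have := pv_len E S hInv.2.1 hInv.2.2.1
    omega
  | succ d ihd =>
    intro S ts hd
    induction ts with
    | nil =>
      intro _
      refine ⟨0, by simp, ?_⟩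
      intro st acc f
      simp [pvW, pvGoA_nil]
    | cons t ts' ihts =>
      intro hInv
      have hInv' : pvInv entity E S ts' := pvInv_tail entity E hInv
      obtain ⟨c2, hc2, hrec2⟩ := ihts hInv'
      have hWts : pvW E (t :: ts') =
          (if pvNamed t then pvW E (pvChild E t) else [t]) ++ pvW E ts' := by
        rw [pvW_unfold entity E hpre2 hInv, List.flatMap_cons,
          ← pvW_unfold entity E hpre2 hInv']
      have hpow1 : 1 ≤ (pvT E + 1) ^ (d + 1) := Nat.one_le_pow _ _ (by omega)
      by_cases hn : pvNamed t = true
      · by_cases hk : t ∈ E.map Prod.fst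
        · obtain ⟨hInvC, hlen⟩ := pv_push entity E hpre2 hInv (List.mem_cons_self ..) hn hk
          have hlen' : S.length + 1 ≤ pvN E := by simpa using hlen
          obtain ⟨c1, hc1, hrec1⟩ := ihd (t :: S) (pvChild E t) (by simp; omega) hInvC
          refine ⟨c1 + c2 + 1, ?_, ?_⟩
          · have hc1' : c1 ≤ pvT E * (pvT E + 1) ^ d :=
              hc1.trans (Nat.mul_le_mul_right _ (pv_child_le E t))
            have hd1 : 1 ≤ (pvT E + 1) ^ d := Nat.one_le_pow _ _ (by omega)
            have hpw : (pvT E + 1) ^ (d + 1) = pvT E * (pvT E + 1) ^ d + (pvT E + 1) ^ d := by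
              rw [pow_succ]; ring
            calc c1 + c2 + 1
                ≤ pvT E * (pvT E + 1) ^ d + ts'.length * (pvT E + 1) ^ (d + 1) + 1 := by omega
              _ ≤ ts'.length * (pvT E + 1) ^ (d + 1) + (pvT E + 1) ^ (d + 1) := by omega
              _ = (t :: ts').length * (pvT E + 1) ^ (d + 1) := by
                  rw [List.length_cons, Nat.succ_mul]
          · intro st acc f
            have harith : f + (c1 + c2 + 1) = ((f + c2) + c1) + 1 := by omega
            rw [harith]
            show pvLoop E (((f + c2) + c1) + 1) (t :: (ts' ++ st)) acc = _
            rw [pvLoop, if_pos hn, hrec1 (ts' ++ st) acc (f + c2), hrec2 st _ f, hWts,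
              if_pos hn]
            simp
        · refine ⟨c2 + 1, by simp only [List.length_cons]; nlinarith, ?_⟩
          intro st acc f
          have harith : f + (c2 + 1) = (f + c2) + 1 := by omega
          rw [harith]
          show pvLoop E ((f + c2) + 1) (t :: (ts' ++ st)) acc = _
          rw [pvLoop, if_pos hn, pv_child_nil E t hk, List.nil_append,
            hrec2 st acc f, hWts, if_pos hn, pv_child_nil E t hk]
          simp [pvW, pvGoA_nil]
      · refine ⟨c2 + 1, by simp only [List.length_cons]; nlinarith, ?_⟩
        intro st acc f
        have harith : f + (c2 + 1) = (f + c2) + 1 := by omega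
        rw [harith]
        show pvLoop E ((f + c2) + 1) (t :: (ts' ++ st)) acc = _
        rw [pvLoop, if_neg (by simp [hn]), hrec2 st (acc ++ [t]) f, hWts, if_neg (by simp [hn])]
        simp

theorem pv_dedup_le (E : List (String × List (String × List String))) : pvN E ≤ E.length := by
  have h1 : ((E.map Prod.fst).dedup).length ≤ (E.map Prod.fst).length :=
    (List.dedup_sublist _).length_le
  simpa [pvN] using h1

-- ===== VERDICT (by name: the statement is the Claim_ definition above) =====
theorem resolve_entity_spec : Claim_equal_resolve_entity := by
  intro entity E _ hpre
  obtain ⟨h1, hpre2'⟩ := hpre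
  have hpre2 : ∀ t ∈ pvReachSet entity E, t ∉ pvGrow E (pvN E) (pvNexts E t) :=
    fun t ht => (hpre2' t ht).2
  show resolve_entity entity E = resolve_entity_alt entity E
  have hInv0 : pvInv entity E [] (pvTgts entity) := by
    refine ⟨trivial, List.nodup_nil, by simp, ?_⟩
    intro t ht hn
    exact List.mem_filter.mpr ⟨ht, hn⟩
  have hA : resolve_entity entity E = pvW E (pvTgts entity) := by
    rw [resolve_entity, pvW]
    have hle := pv_dedup_le E
    exact pv_stab entity E hpre2 (pvN E + 1) [] (pvTgts entity) (by simp) hInv0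
      (E.length + 1) (pvN E + 1) (by simp; omega) (by simp)
  obtain ⟨c, hc, hrec⟩ := pv_bridge entity E hpre2 (pvN E + 1) [] (pvTgts entity) (by simp) hInv0
  have hcle : c + 1 ≤ pvFuel entity E := by
    have hp : (pvT E + 1) ^ (pvN E + 1) ≤ (pvT E + 1) ^ (E.length + 1) :=
      Nat.pow_le_pow_right (by omega) (by have := pv_dedup_le E; omega)
    have h2 := Nat.mul_le_mul_left (pvTgts entity).length hp
    rw [pvFuel]
    exact Nat.add_le_add_right (hc.trans h2) 1
  have hB : resolve_entity_alt entity E = pvW E (pvTgts entity) := by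
    rw [resolve_entity_alt]
    have h := hrec [] [] (pvFuel entity E - c)
    rw [List.append_nil, List.nil_append, pvLoop_nil] at h
    rw [show pvFuel entity E = (pvFuel entity E - c) + c from by omega, h]
  rw [hA, hB]
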